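-- pv_equiv track=rewrite | github.com/tagore8661/accenture-coding-practice | Problem-99.py | max_cars_parked
-- ===== SOURCE A (Python) =====
-- def max_cars_parked(n, arr):
--     max_cars = 0
--     current_cars = 0
--
--     for status in arr:
--         if status == 'S':
--             current_cars += 1
--         else:
--             max_cars = max(max_cars, current_cars)
--             current_cars = 0
--
--     max_cars = max(max_cars, current_cars)
--     return max_cars
-- ===== SOURCE B (Python) =====
-- def max_cars_parked(n, arr):
--     # Partition arr into maximal runs of equal values, then take the
--     # largest length among the 'S' runs (0 if there are none).
--     runs = []
--     i = 0
--     while i < len(arr):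
--         j = i
--         while j < len(arr) and arr[j] == arr[i]:
--             j += 1
--         runs.append((arr[i], j - i))
--         i = j
--     return max([0] + [length for value, length in runs if value == 'S'])
-- ===== Notes on version B (the rewrite author's own statement) =====
-- stated objective: alternative
-- what changed: B first partitions the array into maximal runs of equal values and then takes the maximum length among the 'S' runs, instead of A's single pass with a running counter reset inline.
import Mathlib
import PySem

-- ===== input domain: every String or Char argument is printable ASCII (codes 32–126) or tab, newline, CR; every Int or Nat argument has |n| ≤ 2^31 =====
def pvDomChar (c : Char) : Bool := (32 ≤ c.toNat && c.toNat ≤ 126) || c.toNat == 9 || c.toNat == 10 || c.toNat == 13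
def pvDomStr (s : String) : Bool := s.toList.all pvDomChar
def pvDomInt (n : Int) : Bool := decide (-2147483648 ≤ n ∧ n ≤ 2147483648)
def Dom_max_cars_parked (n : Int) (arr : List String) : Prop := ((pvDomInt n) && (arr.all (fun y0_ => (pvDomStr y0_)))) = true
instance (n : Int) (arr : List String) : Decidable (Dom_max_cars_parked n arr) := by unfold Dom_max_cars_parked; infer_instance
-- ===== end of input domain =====

-- B partitions the array into maximal runs of equal values and takes the
-- maximum length of the 'S' runs, instead of A's running counter (alternative).


-- ===== PORT A =====
def max_cars_parked (n : Int) (arr : List String) : Int :=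
  let s := arr.foldl
    (fun (p : Int × Int) status =>
      if status = "S" then (p.1, p.2 + 1) else (max p.1 p.2, 0))
    (0, 0)
  max s.1 s.2

-- ===== PORT B =====
-- inner while loop of B: count further elements equal to v, return the rest
def takeRun (v : String) : List String → Int × List String
  | [] => (0, [])
  | y :: ys =>
    if y = v then ((takeRun v ys).1 + 1, (takeRun v ys).2)
    else (0, y :: ys)

theorem takeRun_len (v : String) (l : List String) :
    (takeRun v l).2.length ≤ l.length := by
  induction l with
  | nil => simp [takeRun]
  | cons y ys ih =>
    simp only [takeRun]
    split
    · simpa using Nat.le_succ_of_le ih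
    · simp

-- outer while loop of B: the list of maximal runs (value, length)
def runsOf : List String → List (String × Int)
  | [] => []
  | x :: xs =>
    (x, (takeRun x xs).1 + 1) :: runsOf (takeRun x xs).2
  termination_by l => l.length
  decreasing_by
    exact Nat.lt_succ_of_le (takeRun_len x xs)

def max_cars_parked_alt (n : Int) (arr : List String) : Int :=
  List.foldl max 0 (((runsOf arr).filter (fun p => p.1 == "S")).map (fun p => p.2))

-- ===== PRECONDITION & SPEC =====
def Spec_max_cars_parked (n : Int) (arr : List String) (out : Int) : Prop := out = max_cars_parked_alt n arr
instance (n : Int) (arr : List String) (out : Int) : Decidable (Spec_max_cars_parked n arr out) := by unfold Spec_max_cars_parked; infer_instance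

-- ===== CLAIM (what is proved, stated in full; the proofs are below) =====
def Claim_equal_max_cars_parked : Prop := ∀ (n : Int) (arr : List String), Dom_max_cars_parked n arr → Spec_max_cars_parked n arr (max_cars_parked n arr)

-- ===== LEMMAS AND PROOFS =====

theorem runsOf_nil : runsOf [] = [] := by rw [runsOf.eq_def]

theorem runsOf_cons (x : String) (xs : List String) :
    runsOf (x :: xs) = (x, (takeRun x xs).1 + 1) :: runsOf (takeRun x xs).2 := by
  rw [runsOf.eq_def]

-- functional form of A's loop: best l c = final max starting with current run c and max 0
def best : List String → Int → Int
  | [], c => c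
  | x :: xs, c => if x = "S" then best xs (c + 1) else max c (best xs 0)

def stepA (p : Int × Int) (status : String) : Int × Int :=
  if status = "S" then (p.1, p.2 + 1) else (max p.1 p.2, 0)

theorem foldlA_best (l : List String) (m c : Int) :
    max (l.foldl stepA (m, c)).1 (l.foldl stepA (m, c)).2 = max m (best l c) := by
  induction l generalizing m c with
  | nil => simp [best]
  | cons x xs ih =>
    by_cases h : x = "S" <;>
      simp [best, stepA, h, List.foldl_cons, ih, max_assoc]

theorem best_nonneg (l : List String) (c : Int) (hc : 0 ≤ c) : 0 ≤ best l c := by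
  induction l generalizing c with
  | nil => simpa [best]
  | cons x xs ih =>
    by_cases h : x = "S"
    · simpa [best, h] using ih (c + 1) (by omega)
    · simp only [best, h, if_false, le_max_iff]
      exact Or.inl hc

-- the rest after a run does not start with the run's value
theorem takeRun_rest (v : String) (l : List String) :
    (takeRun v l).2 = [] ∨ ∃ y ys, (takeRun v l).2 = y :: ys ∧ y ≠ v := by
  induction l with
  | nil => simp [takeRun]
  | cons y ys ih =>
    simp only [takeRun]
    split
    · exact ih
    · next h => exact Or.inr ⟨y, ys, rfl, h⟩

theorem bestS (l : List String) (c : Int) :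
    best l c = best (takeRun "S" l).2 (c + (takeRun "S" l).1) := by
  induction l generalizing c with
  | nil => simp [takeRun, best]
  | cons y ys ih =>
    by_cases h : y = "S"
    · simp only [takeRun, best, if_pos h]
      rw [ih (c + 1)]
      ring_nf
    · simp [takeRun, best, h]

theorem drop_nonS (v : String) (hv : v ≠ "S") (l : List String) :
    best (takeRun v l).2 0 = best l 0 := by
  induction l with
  | nil => simp [takeRun]
  | cons y ys ih =>
    by_cases h : y = v
    · subst h
      have hys : best (y :: ys) 0 = best ys 0 := by
        simp [best, hv, max_eq_right (best_nonneg ys 0 le_rfl)]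
      rw [hys]
      simpa [takeRun] using ih
    · simp [takeRun, h]

-- the fold used on runs
def frun (a : Int) (p : String × Int) : Int := if p.1 == "S" then max a p.2 else a

theorem foldl_frun_max (L : List (String × Int)) (a b : Int) :
    L.foldl frun (max a b) = max a (L.foldl frun b) := by
  induction L generalizing b with
  | nil => rfl
  | cons p ps ih =>
    by_cases h : p.1 = "S" <;>
      simp [List.foldl_cons, frun, h, ih, max_assoc]

theorem takeRun_fst_nonneg (v : String) (l : List String) : 0 ≤ (takeRun v l).1 := by
  induction l with
  | nil => simp [takeRun]
  | cons y ys ih =>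
    simp only [takeRun]
    split
    · simpa using by omega
    · simp

theorem best_runs : ∀ (nl : Nat) (l : List String), l.length = nl →
    best l 0 = (runsOf l).foldl frun 0 := by
  intro nl
  induction nl using Nat.strong_induction_on with
  | _ nl ih =>
    intro l hlen
    match l with
    | [] => simp [best, runsOf_nil]
    | x :: xs =>
      have hrlen : (takeRun x xs).2.length < nl := by
        have := takeRun_len x xs
        simp at hlen
        omega
      have hIH := ih _ hrlen (takeRun x xs).2 rfl
      by_cases h : x = "S"
      · subst h
        have hk := takeRun_fst_nonneg "S" xs
        have hstep : best ("S" :: xs) 0 = best (takeRun "S" xs).2 ((takeRun "S" xs).1 + 1) := by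
          have h1 : best ("S" :: xs) 0 = best xs 1 := by simp [best]
          rw [h1, bestS xs 1]
          ring_nf
        have hrhs : (runsOf ("S" :: xs)).foldl frun 0
            = max ((takeRun "S" xs).1 + 1) ((runsOf (takeRun "S" xs).2).foldl frun 0) := by
          rw [runsOf_cons]
          simp only [List.foldl_cons, frun]
          rw [if_pos (by simp)]
          rw [max_comm 0 _, foldl_frun_max]
        rw [hstep, hrhs, ← hIH]
        rcases takeRun_rest "S" xs with hre | ⟨y, ys, hre, hy⟩
        · rw [hre]
          simp [best]
          omega
        · rw [hre]
          simp only [best, if_neg hy]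
          rw [max_eq_right (best_nonneg ys 0 le_rfl)]
      · have hstep : best (x :: xs) 0 = best (takeRun x xs).2 0 := by
          simp only [best, if_neg h]
          rw [max_eq_right (best_nonneg xs 0 le_rfl), drop_nonS x h xs]
        rw [hstep, hIH, runsOf_cons]
        simp only [List.foldl_cons, frun]
        rw [if_neg (by simpa using h)]

theorem foldl_filter_map (L : List (String × Int)) (a : Int) :
    ((L.filter (fun p => p.1 == "S")).map (fun p => p.2)).foldl max a = L.foldl frun a := by
  induction L generalizing a with
  | nil => rfl
  | cons p ps ih =>
    by_cases h : p.1 = "S" <;>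
      simp [frun, h, ih]

-- ===== VERDICT (by name: the statement is the Claim_ definition above) =====
theorem max_cars_parked_spec : Claim_equal_max_cars_parked := by
  intro n arr _
  show max (arr.foldl stepA (0, 0)).1 (arr.foldl stepA (0, 0)).2
      = ((( runsOf arr).filter (fun p => p.1 == "S")).map (fun p => p.2)).foldl max 0
  rw [foldlA_best arr 0 0, foldl_filter_map, ← best_runs arr.length arr rfl]
  exact max_eq_right (best_nonneg arr 0 le_rfl)
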